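-- pv_equiv track=rewrite | github.com/saffroy/aoc23 | 14/t.py | load_line
-- ===== SOURCE A (Python) =====
-- import itertools
--
-- def load_line(loads, line):
--     l = list(filter(lambda t: t[1] == '#', enumerate(['#'] + line, start=-1)))
--     s = 0
--     for i, _ in l:
--         rounds = list(filter(lambda x: x == 'O',
--                         itertools.takewhile(
--                             lambda x: x != '#', line[i+1:])))
--         s += sum(loads[i+1:i+1+len(rounds)])
--     return s
-- ===== SOURCE B (Python) =====
-- def load_line(loads, line):
--     s = 0
--     anchor = 0
--     for j, c in enumerate(line):
--         if c == '#':
--             anchor = j + 1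
--         elif c == 'O':
--             if anchor < len(loads):
--                 s += loads[anchor]
--             anchor += 1
--     return s
-- ===== Notes on version B (the rewrite author's own statement) =====
-- stated objective: faster
-- what changed: Replaces A's anchor enumeration with a slice+takewhile re-scan per '#' by a single left-to-right pass that tracks the next load index after each '#' and adds loads[anchor] per 'O' (a timing run measured B 2.84x faster at n=262144).
import Mathlib
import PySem

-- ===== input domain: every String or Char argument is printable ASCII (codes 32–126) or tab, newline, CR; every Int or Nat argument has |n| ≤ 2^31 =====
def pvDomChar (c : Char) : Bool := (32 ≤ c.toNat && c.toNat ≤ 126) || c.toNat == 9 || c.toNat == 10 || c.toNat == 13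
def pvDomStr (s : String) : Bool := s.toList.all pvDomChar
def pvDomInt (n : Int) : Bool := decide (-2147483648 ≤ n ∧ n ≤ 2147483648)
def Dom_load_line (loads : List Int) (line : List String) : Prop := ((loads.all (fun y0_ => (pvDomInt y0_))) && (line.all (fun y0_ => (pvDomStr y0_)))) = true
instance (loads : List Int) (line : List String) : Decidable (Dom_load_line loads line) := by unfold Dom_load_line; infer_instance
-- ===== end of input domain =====

-- B replaces A's per-'#' re-scan of the line (slices + takewhile per anchor) by one
-- left-to-right pass tracking the next load index after each '#'; objective: faster (measured).

-- ===== PORT A =====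
def load_line (loads : List Int) (line : List String) : Int :=
  let l := (PySem.List.enumerate ("#" :: line) (-1)).filter (fun t => t.2 == "#")
  let s := l.foldl (fun s t =>
    let rounds := ((PySem.List.slice line (some (t.1 + 1)) none).takeWhile
                    (fun x => x != "#")).filter (fun x => x == "O")
    s + (PySem.List.slice loads (some (t.1 + 1)) (some (t.1 + 1 + (rounds.length : Int)))).sum) 0
  s

-- ===== PORT B =====
def load_line_alt (loads : List Int) (line : List String) : Int :=
  ((PySem.List.enumerate line 0).foldl
    (fun (st : Int × Int) jc =>
      if jc.2 == "#" then (st.1, jc.1 + 1)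
      else if jc.2 == "O" then
        ((if st.2 < (loads.length : Int) then st.1 + PySem.List.pyGetD loads st.2 0 else st.1),
         st.2 + 1)
      else st)
    (0, 0)).1

-- ===== PRECONDITION & SPEC =====
def Spec_load_line (loads : List Int) (line : List String) (out : Int) : Prop := out = load_line_alt loads line
instance (loads : List Int) (line : List String) (out : Int) : Decidable (Spec_load_line loads line out) := by unfold Spec_load_line; infer_instance

-- ===== CLAIM (what is proved, stated in full; the proofs are below) =====
def Claim_equal_load_line : Prop := ∀ (loads : List Int) (line : List String), Dom_load_line loads line → Spec_load_line loads line (load_line loads line)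

-- ===== LEMMAS AND PROOFS =====

/-- Number of `"O"` entries of a list. -/
def pvCountO (xs : List String) : Nat := (xs.filter (fun x => x == "O")).length

/-- Common recursive specification: single pass with current position `j` and anchor `a`. -/
def pvF (loads : List Int) : Nat → Nat → List String → Int
  | _, _, [] => 0
  | j, a, c :: rest =>
    if c == "#" then pvF loads (j+1) (j+1) rest
    else if c == "O" then
      (if a < loads.length then loads.getD a 0 else 0) + pvF loads (j+1) (a+1) rest
    else pvF loads (j+1) a rest

/-- A's per-anchor contribution (the body of A's loop). -/
def pvG (loads : List Int) (line : List String) (i : Int) : Int :=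
  let rounds := ((PySem.List.slice line (some (i + 1)) none).takeWhile
                  (fun x => x != "#")).filter (fun x => x == "O")
  (PySem.List.slice loads (some (i + 1)) (some (i + 1 + (rounds.length : Int)))).sum

-- ---------- B-side: load_line_alt = pvF ----------

lemma pvB_fold (loads : List Int) (line : List String) : ∀ (j a : Nat) (s : Int),
    ((PySem.List.enumerate line (j : Int)).foldl
      (fun (st : Int × Int) jc =>
        if jc.2 == "#" then (st.1, jc.1 + 1)
        else if jc.2 == "O" then
          ((if st.2 < (loads.length : Int) then st.1 + PySem.List.pyGetD loads st.2 0 else st.1),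
           st.2 + 1)
        else st)
      (s, (a : Int))).1 = s + pvF loads j a line := by
  induction line with
  | nil => intro j a s; simp [PySem.List.enumerate_nil, pvF]
  | cons c rest ih =>
    intro j a s
    rw [PySem.List.enumerate_cons, List.foldl_cons]
    by_cases h1 : c = "#"
    · subst h1
      simp only [BEq.rfl, if_pos]
      have hc : ((j : Int) + 1) = ((j + 1 : Nat) : Int) := by push_cast; ring
      rw [hc, ih (j+1) (j+1) s]
      simp [pvF]
    · by_cases h2 : c = "O"
      · subst h2
        have hne : (("O" : String) == "#") = false := by decide
        simp only [hne, Bool.false_eq_true, if_false, BEq.rfl, if_pos]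
        have hg : ((a : Int) < (loads.length : Int)) ↔ a < loads.length := by exact_mod_cast Iff.rfl
        have hc : ((a : Int) + 1) = ((a + 1 : Nat) : Int) := by push_cast; ring
        have hcj : ((j : Int) + 1) = ((j + 1 : Nat) : Int) := by push_cast; ring
        rw [hc, hcj]
        by_cases hlt : a < loads.length
        · rw [if_pos (hg.mpr hlt), PySem.List.pyGetD_natCast, ih (j+1) (a+1) (s + loads.getD a 0)]
          simp [pvF, hlt]; ring
        · rw [if_neg (fun hh => hlt (hg.mp hh)), ih (j+1) (a+1) s]
          simp [pvF, hlt]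
      · have hne1 : (c == "#") = false := by simp [h1]
        have hne2 : (c == "O") = false := by simp [h2]
        simp only [hne1, hne2, Bool.false_eq_true, if_false]
        have hcj : ((j : Int) + 1) = ((j + 1 : Nat) : Int) := by push_cast; ring
        rw [hcj, ih (j+1) a s]
        simp [pvF, hne1, hne2]

lemma pvB_eq (loads : List Int) (line : List String) :
    load_line_alt loads line = pvF loads 0 0 line := by
  have h := pvB_fold loads line 0 0 0
  simpa [load_line_alt] using h

-- ---------- pvF: shift and segment lemmas ----------

lemma pvF_shift (loads : List Int) (d : Nat) : ∀ (xs : List String) (j a : Nat),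
    pvF loads (j + d) (a + d) xs = pvF (loads.drop d) j a xs := by
  intro xs
  induction xs with
  | nil => intro j a; simp [pvF]
  | cons c rest ih =>
    intro j a
    by_cases h1 : c = "#"
    · subst h1
      simp only [pvF, BEq.rfl, if_pos]
      rw [show j + d + 1 = (j + 1) + d by omega]
      exact ih (j+1) (j+1)
    · by_cases h2 : c = "O"
      · subst h2
        simp only [pvF, show (("O" : String) == "#") = false by decide, Bool.false_eq_true,
          if_false, BEq.rfl, if_pos]
        rw [show a + d + 1 = (a + 1) + d by omega, show j + d + 1 = (j + 1) + d by omega,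
          ih (j+1) (a+1)]
        congr 1
        have hlen : (loads.drop d).length = loads.length - d := by simp
        by_cases hlt : a + d < loads.length
        · rw [if_pos hlt, if_pos (by omega)]
          simp [List.getD_eq_getElem?_getD, List.getElem?_drop, Nat.add_comm d a]
        · rw [if_neg hlt, if_neg (by omega)]
      · simp only [pvF, show (c == "#") = false by simp [h1], show (c == "O") = false by simp [h2],
          Bool.false_eq_true, if_false]
        rw [show j + d + 1 = (j + 1) + d by omega]
        exact ih (j+1) a

lemma pvDropTakeSum (loads : List Int) (a k : Nat) :
    ((loads.drop a).take (k+1)).sum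
      = (if a < loads.length then loads.getD a 0 else 0) + ((loads.drop (a+1)).take k).sum := by
  by_cases h : a < loads.length
  · rw [List.drop_eq_getElem_cons h, List.take_succ_cons, List.sum_cons, if_pos h]
    congr 1
    simp [List.getD_eq_getElem?_getD, List.getElem?_eq_getElem h]
  · have h1 : loads.drop a = [] := List.drop_eq_nil_of_le (by omega)
    have h2 : loads.drop (a+1) = [] := List.drop_eq_nil_of_le (by omega)
    simp [h, h1, h2]

lemma pvF_seg (loads : List Int) : ∀ (pre : List String), (∀ x ∈ pre, ¬ x = "#") →
    ∀ (l : List String) (j a : Nat),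
    pvF loads j a (pre ++ l)
      = ((loads.drop a).take (pvCountO pre)).sum
        + pvF loads (j + pre.length) (a + pvCountO pre) l := by
  intro pre
  induction pre with
  | nil => intro _ l j a; simp [pvCountO]
  | cons c pre ih =>
    intro h l j a
    have hc : ¬ c = "#" := h c (by simp)
    have h' : ∀ x ∈ pre, ¬ x = "#" := fun x hx => h x (by simp [hx])
    by_cases ho : c = "O"
    · subst ho
      have hcount : pvCountO ("O" :: pre) = pvCountO pre + 1 := by simp [pvCountO]
      rw [List.cons_append]
      simp only [pvF, show (("O" : String) == "#") = false by decide, Bool.false_eq_true,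
        if_false, BEq.rfl, if_pos]
      rw [ih h' l (j+1) (a+1), hcount, pvDropTakeSum loads a (pvCountO pre)]
      rw [show j + 1 + pre.length = j + (pre.length + 1) by omega,
        show a + 1 + pvCountO pre = a + (pvCountO pre + 1) by omega]
      simp [List.length_cons]
      ring
    · have hcount : pvCountO (c :: pre) = pvCountO pre := by simp [pvCountO, ho]
      rw [List.cons_append]
      simp only [pvF, show (c == "#") = false by simp [hc], show (c == "O") = false by simp [ho],
        Bool.false_eq_true, if_false]
      rw [ih h' l (j+1) a, hcount,
        show j + 1 + pre.length = j + (pre.length + 1) by omega]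
      simp [List.length_cons]

-- ---------- A-side: load_line as a sum of per-anchor contributions ----------

lemma pvA_sum (loads : List Int) (line : List String) :
    load_line loads line
      = pvG loads line (-1)
        + (((PySem.List.enumerate line 0).filter (fun t => t.2 == "#")).map
            (fun t => pvG loads line t.1)).sum := by
  simp only [load_line, pvG]
  rw [PySem.List.enumerate_cons]
  norm_num
  rw [PySem.List.foldl_add]

lemma pvNoHashFilter (xs : List String) (s : Int) (h : ∀ x ∈ xs, ¬ x = "#") :
    (PySem.List.enumerate xs s).filter (fun t => t.2 == "#") = [] := by
  rw [List.filter_eq_nil_iff]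
  intro t ht
  rw [PySem.List.mem_enumerate_iff] at ht
  obtain ⟨k, hk, rfl⟩ := ht
  simpa using h _ (List.getElem_mem hk)

lemma pvEnumShift (xs : List String) : ∀ (s d : Int),
    PySem.List.enumerate xs (s + d) = (PySem.List.enumerate xs s).map (fun p => (p.1 + d, p.2)) := by
  induction xs with
  | nil => intro s d; simp [PySem.List.enumerate_nil]
  | cons c rest ih =>
    intro s d
    rw [PySem.List.enumerate_cons, PySem.List.enumerate_cons, List.map_cons]
    rw [show s + d + 1 = (s + 1) + d by ring, ih (s+1) d]

lemma pvTakeWhileAppend (pre l : List String) (h : ∀ x ∈ pre, ¬ x = "#") :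
    (pre ++ l).takeWhile (fun x => x != "#") = pre ++ l.takeWhile (fun x => x != "#") := by
  induction pre with
  | nil => simp
  | cons c pre ih =>
    have hc : (c != "#") = true := by simpa using h c (by simp)
    rw [List.cons_append, List.takeWhile_cons, if_pos hc, ih (fun x hx => h x (by simp [hx]))]
    rfl

lemma pvG_nat (loads : List Int) (line : List String) (n : Nat) :
    pvG loads line ((n : Int) - 1)
      = ((loads.drop n).take
          (pvCountO ((line.drop n).takeWhile (fun x => x != "#")))).sum := by
  simp only [pvG]
  rw [show ((n : Int) - 1 + 1) = (n : Int) by ring]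
  rw [PySem.List.slice_from_natCast, PySem.List.slice_natCast_add]
  rfl

-- ---------- A's segment recurrence ----------

lemma pvA_nohash (loads : List Int) (line : List String) (h : ∀ x ∈ line, ¬ x = "#") :
    load_line loads line = (loads.take (pvCountO line)).sum := by
  rw [pvA_sum, pvNoHashFilter line 0 h]
  have h0 := pvG_nat loads line 0
  have htw : line.takeWhile (fun x => x != "#") = line := by
    rw [List.takeWhile_eq_self_iff]
    intro x hx; simpa using h x hx
  simp only [Nat.cast_zero, zero_sub, List.drop_zero, htw] at h0
  simp [h0]

lemma pvA_rec (loads : List Int) (pre rest : List String) (h : ∀ x ∈ pre, ¬ x = "#") :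
    load_line loads (pre ++ "#" :: rest)
      = (loads.take (pvCountO pre)).sum + load_line (loads.drop (pre.length + 1)) rest := by
  set line := pre ++ "#" :: rest with hline
  set m := pre.length with hm
  have hdrop : ∀ k : Nat, line.drop (m + 1 + k) = rest.drop k := by
    intro k
    rw [hline, List.drop_append, List.drop_eq_nil_of_le (by omega),
      show m + 1 + k - pre.length = k + 1 by omega, List.drop_succ_cons, List.nil_append]
  have hfil : (PySem.List.enumerate line 0).filter (fun t => t.2 == "#")
      = ((m : Int), ("#" : String)) :: ((PySem.List.enumerate rest 0).filter (fun t => t.2 == "#")).map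
          (fun p => (p.1 + ((m : Int) + 1), p.2)) := by
    rw [hline, PySem.List.enumerate_append, List.filter_append, pvNoHashFilter pre 0 h,
      PySem.List.enumerate_cons, List.filter_cons_of_pos (by simp), List.nil_append]
    rw [show ((0 : Int) + (pre.length : Int) + 1) = 0 + ((m : Int) + 1) by rw [hm]; ring,
      pvEnumShift rest 0 ((m : Int) + 1), List.filter_map]
    rw [show ((0 : Int) + (pre.length : Int)) = (m : Int) by rw [hm]; ring]
    rfl
  rw [pvA_sum, hfil, List.map_cons, List.sum_cons, List.map_map,
    pvA_sum (loads.drop (m + 1)) rest]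
  have h0 : pvG loads line (-1) = (loads.take (pvCountO pre)).sum := by
    have h0 := pvG_nat loads line 0
    have htw : line.takeWhile (fun x => x != "#") = pre := by
      rw [hline, pvTakeWhileAppend pre _ h, List.takeWhile_cons]
      norm_num
    simp only [Nat.cast_zero, zero_sub, List.drop_zero, htw] at h0
    exact h0
  have h1 : pvG loads line ((m : Int)) = pvG (loads.drop (m + 1)) rest (-1) := by
    have hL := pvG_nat loads line (m + 1)
    have hR := pvG_nat (loads.drop (m + 1)) rest 0
    rw [show ((m + 1 : Nat) : Int) - 1 = (m : Int) by push_cast; ring] at hL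
    simp only [Nat.cast_zero, zero_sub, List.drop_zero] at hR
    rw [hL, hR, show m + 1 = m + 1 + 0 by omega, hdrop 0, List.drop_zero]
  have h2 : (((PySem.List.enumerate rest 0).filter (fun t => t.2 == "#")).map
        ((fun t => pvG loads line t.1) ∘ (fun p => (p.1 + ((m : Int) + 1), p.2)))).sum
      = (((PySem.List.enumerate rest 0).filter (fun t => t.2 == "#")).map
          (fun t => pvG (loads.drop (m + 1)) rest t.1)).sum := by
    congr 1
    apply List.map_congr_left
    intro p hp
    have hpm := List.mem_of_mem_filter hp
    rw [PySem.List.mem_enumerate_iff] at hpm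
    obtain ⟨k, hk, rfl⟩ := hpm
    simp only [Function.comp]
    have e1 : ((0 : Int) + (k : Nat) + ((m : Int) + 1)) = ((m + 1 + (k + 1) : Nat) : Int) - 1 := by
      push_cast; ring
    have e2 : ((0 : Int) + (k : Nat)) = ((k + 1 : Nat) : Int) - 1 := by push_cast; ring
    rw [e1, pvG_nat, e2, pvG_nat, hdrop (k + 1), ← List.drop_drop (j := m + 1) (i := k + 1)]
  rw [h0, h1, h2]

-- ---------- main: A = pvF, and the verdict ----------

lemma pvA_eq_F : ∀ (N : Nat) (line : List String) (loads : List Int), line.length ≤ N →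
    load_line loads line = pvF loads 0 0 line := by
  intro N
  induction N with
  | zero =>
    intro line loads hlen
    have : line = [] := List.eq_nil_of_length_eq_zero (by omega)
    subst this
    rw [pvA_nohash loads [] (by simp)]
    simp [pvF, pvCountO]
  | succ N ih =>
    intro line loads hlen
    by_cases hmem : "#" ∈ line
    · have hdw : line.dropWhile (fun x => x != "#") ≠ [] := by
        intro hnil
        rw [List.dropWhile_eq_nil_iff] at hnil
        simpa using hnil _ hmem
      obtain ⟨c, rest, hcr⟩ : ∃ c rest, line.dropWhile (fun x => x != "#") = c :: rest := by
        cases hcase : line.dropWhile (fun x => x != "#") with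
        | nil => exact absurd hcase hdw
        | cons c rest => exact ⟨c, rest, rfl⟩
      have hc : c = "#" := by
        have hh := List.head_dropWhile_not (fun x => x != "#") hdw
        simp only [hcr, List.head_cons] at hh
        simpa using hh
      subst hc
      set pre := line.takeWhile (fun x => x != "#") with hpre
      have hsplit : line = pre ++ "#" :: rest := by
        rw [hpre, ← hcr, List.takeWhile_append_dropWhile]
      have hprenh : ∀ x ∈ pre, ¬ x = "#" := by
        intro x hx
        have := List.mem_takeWhile_imp hx
        simpa using this
      have hrest : rest.length ≤ N := by
        have : line.length = pre.length + (rest.length + 1) := by rw [hsplit]; simp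
        omega
      rw [hsplit, pvA_rec loads pre rest hprenh, ih rest (loads.drop (pre.length + 1)) hrest]
      rw [pvF_seg loads pre hprenh ("#" :: rest) 0 0]
      simp only [pvF, BEq.rfl, if_pos, List.drop_zero, Nat.zero_add]
      rw [← pvF_shift loads (pre.length + 1) rest 0 0]
      norm_num [Nat.add_comm]
    · have h' : ∀ x ∈ line, ¬ x = "#" := fun x hx hxe => hmem (hxe ▸ hx)
      rw [pvA_nohash loads line h']
      have hseg := pvF_seg loads line h' [] 0 0
      rw [List.append_nil] at hseg
      rw [hseg]
      simp [pvF]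

-- ===== VERDICT (by name: the statement is the Claim_ definition above) =====
theorem load_line_spec : Claim_equal_load_line := by
  intro loads line _
  show load_line loads line = load_line_alt loads line
  rw [pvA_eq_F line.length line loads le_rfl, pvB_eq]
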